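-- pv_equiv track=rewrite | github.com/15r10nk/format-dedent | src/format_dedent/__main__.py | format_string_content
-- ===== SOURCE A (Python) =====
-- def format_string_content(content: str, indent_level: int = 0) -> str:
--     """
--     Format the content of a string by indenting it properly.
--     The content will be indented to align with the opening quote.
--
--     Args:
--         content: The string content to format
--         indent_level: The target indentation level (in spaces) - aligns with the opening quote
--
--     Returns:
--         The formatted string with proper indentation
--     """
--     import textwrap
--
--     # First dedent to get the "real" content without any indentation
--     dedented = textwrap.dedent(content)
--
--     # Remove leading/trailing empty lines
--     lines = dedented.split("\n")
--
--     # Find first and last non-empty lines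
--     first_non_empty = 0
--     last_non_empty = len(lines) - 1
--
--     for i, line in enumerate(lines):
--         if line.strip():
--             first_non_empty = i
--             break
--
--     for i in range(len(lines) - 1, -1, -1):
--         if lines[i].strip():
--             last_non_empty = i
--             break
--
--     # Keep leading/trailing empty lines but process the content
--     result_lines = []
--     indent_str = " " * indent_level  # Use the exact indentation level passed
--
--     for i, line in enumerate(lines):
--         if i < first_non_empty or i > last_non_empty:
--             # Keep empty lines at start/end empty
--             result_lines.append("")
--         elif line.strip():
--             # Non-empty line: add indentation (preserve trailing whitespace)
--             result_lines.append(indent_str + line)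
--         else:
--             # Empty line in the middle: keep it empty
--             result_lines.append("")
--
--     return "\n".join(result_lines)
-- ===== SOURCE B (Python) =====
-- def format_string_content(content: str, indent_level: int = 0) -> str:
--     """Dedent-and-reindent in one direct pass: compute the common ' '/'\t' margin
--     of the lines that have non-space/tab content, then map every line to
--     indent + line-without-margin (or '' for whitespace-only lines)."""
--     lines = content.split("\n")
--
--     # Longest common leading run of spaces/tabs over lines that have other content.
--     margin = None
--     for line in lines:
--         k = 0
--         while k < len(line) and line[k] in " \t":
--             k += 1
--         if k < len(line):  # line has a character besides spaces/tabs
--             ws = line[:k]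
--             if margin is None:
--                 margin = ws
--             else:
--                 n = min(len(margin), len(ws))
--                 j = 0
--                 while j < n and margin[j] == ws[j]:
--                     j += 1
--                 margin = margin[:j]
--
--     m = len(margin) if margin else 0
--     pad = " " * indent_level
--     return "\n".join(pad + line[m:] if line.strip() else "" for line in lines)
-- ===== Notes on version B (the rewrite author's own statement) =====
-- stated objective: simpler
-- what changed: B drops textwrap.dedent and A's whole dedent-join-resplit-rescan pipeline (including the two dead boundary scans for first/last non-empty line, which only ever guard lines that are blank anyway): it computes the common space/tab margin itself in one loop over the original lines and emits the result in a single per-line mapping pass.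
import Mathlib
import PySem

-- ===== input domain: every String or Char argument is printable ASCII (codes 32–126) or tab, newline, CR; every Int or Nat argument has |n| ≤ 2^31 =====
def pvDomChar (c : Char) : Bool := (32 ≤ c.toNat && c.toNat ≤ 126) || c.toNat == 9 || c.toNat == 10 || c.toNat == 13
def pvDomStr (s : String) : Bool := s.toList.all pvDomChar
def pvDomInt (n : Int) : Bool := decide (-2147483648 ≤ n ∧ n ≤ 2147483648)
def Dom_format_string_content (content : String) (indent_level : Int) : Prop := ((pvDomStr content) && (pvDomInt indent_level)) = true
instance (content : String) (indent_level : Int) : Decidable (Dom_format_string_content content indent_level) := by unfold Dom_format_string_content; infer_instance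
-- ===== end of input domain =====

-- B replaces A's dedent-then-rescan pipeline (textwrap.dedent, join, re-split, two
-- boundary scans, range-checked rebuild) by one margin computation over the original
-- lines and a single per-line mapping pass; objective: simpler.

-- ===== PORT A =====
-- A calls textwrap.dedent (CPython 3.11); it is transliterated below.  Its two
-- MULTILINE regexes ('^[ \t]+$' blanking and '(^[ \t]*)(?:[^ \t\n])' findall) are
-- rendered line-by-line over the '\n'-split lines, which is exact for these
-- '^'-anchored patterns on '\n'-separated text.
def pvA_isWsChar (c : Char) : Bool := c == ' ' || c == '\t'

-- a line matched by _whitespace_only_re ('^[ \t]+$')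
def pvA_wsOnly (l : List Char) : Bool := !l.isEmpty && l.all pvA_isWsChar

-- the 'for i, (x, y) in enumerate(zip(margin, indent)): if x != y: margin = margin[:i]; break' loop:
-- index of the first mismatch of the two strings (none: zip exhausted without a mismatch)
def pvA_firstMismatch : List Char → List Char → Option Nat
  | x :: xs, y :: ys => if x == y then (pvA_firstMismatch xs ys).map (· + 1) else some 0
  | _, _ => none

-- one iteration of dedent's 'for indent in indents' margin loop
def pvA_marginStep (margin : Option (List Char)) (indent : List Char) : Option (List Char) :=
  match margin with
  | none => some indent
  | some m =>
    if m.isPrefixOf indent then some m                  -- indent.startswith(margin): pass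
    else if indent.isPrefixOf m then some indent        -- margin.startswith(indent): margin = indent
    else some (match pvA_firstMismatch m indent with    -- the zip loop (margin unchanged if no break)
               | some i => m.take i
               | none => m)

-- textwrap.dedent(text)
def pvA_dedent (text : List Char) : List Char :=
  let lines := (PySem.Chars.splitOn text ['\n']).map
                 (fun l => if pvA_wsOnly l then [] else l)            -- _whitespace_only_re.sub('', text)
  let indents := (lines.filter (fun l => !(l.dropWhile pvA_isWsChar).isEmpty)).map
                 (fun l => l.takeWhile pvA_isWsChar)                  -- _leading_whitespace_re.findall(text)
  match indents.foldl pvA_marginStep none with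
  | some m =>
    if !m.isEmpty then                                                 -- if margin:
      PySem.Chars.join ['\n']
        (lines.map (fun l => if m.isPrefixOf l then l.drop m.length else l))  -- re.sub(r'(?m)^'+margin, '', text)
    else PySem.Chars.join ['\n'] lines
  | none => PySem.Chars.join ['\n'] lines

-- 'for i, line in enumerate(lines): if line.strip(): first_non_empty = i; break'  (stays 0 if never set)
def pvA_findFirst : List (List Char) → Int → Int
  | [], _ => 0
  | l :: rest, i => if !(PySem.Chars.strip l).isEmpty then i else pvA_findFirst rest (i + 1)

-- 'for i in range(len(lines)-1, -1, -1): if lines[i].strip(): last_non_empty = i; break'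
def pvA_findLast (lines : List (List Char)) : List Int → Int
  | [] => (lines.length : Int) - 1
  | i :: rest =>
    if !(PySem.Chars.strip (PySem.List.pyGetD lines i [])).isEmpty then i
    else pvA_findLast lines rest

def format_string_content (content : String) (indent_level : Int) : String :=
  let dedented := pvA_dedent content.toList
  let lines := PySem.Chars.splitOn dedented ['\n']
  let first_non_empty := pvA_findFirst lines 0
  let last_non_empty := pvA_findLast lines (PySem.List.pyRange ((lines.length : Int) - 1) (-1) (-1))
  let indent_str := PySem.List.pyRepeat [' '] indent_level            -- " " * indent_level
  let result_lines := (PySem.List.enumerate lines).foldl (fun acc p =>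
      acc ++ [if p.1 < first_non_empty ∨ p.1 > last_non_empty then []
              else if !(PySem.Chars.strip p.2).isEmpty then indent_str ++ p.2
              else []]) []
  String.ofList (PySem.Chars.join ['\n'] result_lines)

-- ===== PORT B =====
def pvB_isWsChar (c : Char) : Bool := c == ' ' || c == '\t'

-- the 'while j < n and margin[j] == ws[j]' loop: margin[:j] at the first mismatch
def pvB_commonPrefix : List Char → List Char → List Char
  | x :: xs, y :: ys => if x == y then x :: pvB_commonPrefix xs ys else []
  | _, _ => []

-- the single 'for line in lines' margin loop of B (the inner 'while' scanning
-- spaces/tabs is the takeWhile; 'k < len(line)' is the length test)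
def pvB_margin (lines : List (List Char)) : Option (List Char) :=
  lines.foldl (fun margin l =>
    let k := (l.takeWhile pvB_isWsChar).length
    if k < l.length then
      match margin with
      | none => some (l.take k)
      | some m => some (pvB_commonPrefix m (l.take k))
    else margin) none

def format_string_content_alt (content : String) (indent_level : Int) : String :=
  let lines := PySem.Chars.splitOn content.toList ['\n']
  let m := (match pvB_margin lines with | some mg => mg | none => ([] : List Char)).length
  let pad := PySem.List.pyRepeat [' '] indent_level
  String.ofList (PySem.Chars.join ['\n']
    (lines.map (fun l => if !(PySem.Chars.strip l).isEmpty then pad ++ l.drop m else [])))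

-- ===== PRECONDITION & SPEC =====
def Spec_format_string_content (content : String) (indent_level : Int) (out : String) : Prop := out = format_string_content_alt content indent_level
instance (content : String) (indent_level : Int) (out : String) : Decidable (Spec_format_string_content content indent_level out) := by unfold Spec_format_string_content; infer_instance

-- ===== CLAIM (what is proved, stated in full; the proofs are below) =====
def Claim_equal_format_string_content : Prop := ∀ (content : String) (indent_level : Int), Dom_format_string_content content indent_level → Spec_format_string_content content indent_level (format_string_content content indent_level)

-- ===== LEMMAS AND PROOFS =====

theorem pv_go_spec (c : Char) : ∀ (l : List Char) (fuel : Nat) (cur : List Char) (acc : List (List Char)),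
    l.length < fuel →
    PySem.Chars.splitOn.go [c] fuel l cur acc
      = acc.reverse ++ (List.splitOnP (· == c) l).modifyHead (cur.reverse ++ ·) := by
  intro l
  induction l with
  | nil =>
    intro fuel cur acc h
    cases fuel with
    | zero => omega
    | succ f => simp [PySem.Chars.splitOn.go]
  | cons ch rest ih =>
    intro fuel cur acc h
    cases fuel with
    | zero => omega
    | succ f =>
      by_cases hc : ch = c
      · subst hc
        have : ([ch].isPrefixOf (ch :: rest)) = true := by simp [List.isPrefixOf]
        simp only [PySem.Chars.splitOn.go, this, if_pos]
        rw [show List.drop [ch].length (ch :: rest) = rest from rfl]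
        rw [ih f [] ((cur.reverse :: acc)) (by simpa using h)]
        rcases hq : List.splitOnP (· == ch) rest with _ | ⟨q, t⟩
        · exact absurd hq (List.splitOnP_ne_nil _ _)
        · simp [List.splitOnP_cons, hq]
      · have hpre : ([c].isPrefixOf (ch :: rest)) = false := by
          simp [List.isPrefixOf]; exact fun h' => absurd h'.symm hc
        simp only [PySem.Chars.splitOn.go, hpre]
        rw [if_neg (by simp [hpre])]
        rw [ih f (ch :: cur) acc (by simpa using h)]
        rcases hq : List.splitOnP (· == c) rest with _ | ⟨q, t⟩
        · exact absurd hq (List.splitOnP_ne_nil _ _)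
        · simp [List.splitOnP_cons, hq, hc]

theorem pv_splitOn_single (s : List Char) (c : Char) :
    PySem.Chars.splitOn s [c] = s.splitOn c := by
  rw [show PySem.Chars.splitOn s [c] = PySem.Chars.splitOn.go [c] (s.length + 1) s [] [] from rfl]
  rw [pv_go_spec c s (s.length + 1) [] [] (by omega)]
  rcases hq : List.splitOnP (· == c) s with _ | ⟨q, t⟩
  · exact absurd hq (List.splitOnP_ne_nil _ _)
  · simp [List.splitOn, hq]

theorem pv_not_mem_splitOnP (c : Char) : ∀ (s : List Char), ∀ l ∈ List.splitOnP (· == c) s, c ∉ l := by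
  intro s
  induction s with
  | nil => intro l hl; simp [List.splitOnP_nil] at hl; simp [hl]
  | cons a s ih =>
    intro l hl
    by_cases ha : a = c
    · subst ha
      simp [List.splitOnP_cons] at hl
      rcases hl with h | h
      · simp [h]
      · exact ih l h
    · rcases hq : List.splitOnP (· == c) s with _ | ⟨q, t⟩
      · exact absurd hq (List.splitOnP_ne_nil _ _)
      · rw [List.splitOnP_cons, hq] at hl
        simp [ha] at hl
        rcases hl with h | h
        · subst h
          have hq' : c ∉ q := ih q (by simp [hq])
          simp [ha, hq']
          exact fun h' => absurd h'.symm ha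
        · exact ih l (by simp [hq, h])



theorem pv_strip_eq_nil_iff (l : List Char) :
    PySem.Chars.strip l = [] ↔ ∀ x ∈ l, PySem.Chars.isspace x = true := by
  show PySem.Chars.rstrip (PySem.Chars.lstrip l) = [] ↔ _
  unfold PySem.Chars.rstrip PySem.Chars.lstrip
  rw [List.reverse_eq_nil_iff, List.dropWhile_eq_nil_iff]
  constructor
  · intro h x hx
    have hx' : x ∈ List.takeWhile PySem.Chars.isspace l ++ List.dropWhile PySem.Chars.isspace l := by
      rw [List.takeWhile_append_dropWhile]; exact hx
    rcases List.mem_append.mp hx' with h1 | h1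
    · exact List.mem_takeWhile_imp h1
    · exact h x (List.mem_reverse.mpr h1)
  · intro h x hx
    have : List.dropWhile PySem.Chars.isspace l = [] := List.dropWhile_eq_nil_iff.mpr h
    rw [this] at hx
    simp at hx

theorem pv_ws_isspace {c : Char} (h : pvA_isWsChar c = true) : PySem.Chars.isspace c = true := by
  simp [pvA_isWsChar] at h
  rcases h with h | h <;> subst h <;> decide


theorem pv_cp_prefix_left : ∀ (a b : List Char), pvB_commonPrefix a b <+: a := by
  intro a
  induction a with
  | nil => intro b; cases b <;> simp [pvB_commonPrefix]
  | cons x xs ih =>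
    intro b
    cases b with
    | nil => simp [pvB_commonPrefix]
    | cons y ys =>
      by_cases h : x = y
      · subst h; simpa [pvB_commonPrefix, List.cons_prefix_cons] using ih ys
      · simp [pvB_commonPrefix, h]

theorem pv_cp_prefix_right : ∀ (a b : List Char), pvB_commonPrefix a b <+: b := by
  intro a
  induction a with
  | nil => intro b; cases b <;> simp [pvB_commonPrefix]
  | cons x xs ih =>
    intro b
    cases b with
    | nil => simp [pvB_commonPrefix]
    | cons y ys =>
      by_cases h : x = y
      · subst h; simpa [pvB_commonPrefix, List.cons_prefix_cons] using ih ys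
      · simp [pvB_commonPrefix, h]

theorem pv_cp_of_prefix_left : ∀ (a b : List Char), a <+: b → pvB_commonPrefix a b = a := by
  intro a
  induction a with
  | nil => intro b _; cases b <;> simp [pvB_commonPrefix]
  | cons x xs ih =>
    intro b hb
    cases b with
    | nil => simp at hb
    | cons y ys =>
      rcases List.cons_prefix_cons.mp hb with ⟨h1, h2⟩
      subst h1
      simp [pvB_commonPrefix, ih ys h2]

theorem pv_cp_of_prefix_right : ∀ (a b : List Char), b <+: a → pvB_commonPrefix a b = b := by
  intro a
  induction a with
  | nil => intro b hb; rw [List.prefix_nil.mp hb]; simp [pvB_commonPrefix]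
  | cons x xs ih =>
    intro b hb
    cases b with
    | nil => cases xs <;> simp [pvB_commonPrefix]
    | cons y ys =>
      rcases List.cons_prefix_cons.mp hb with ⟨h1, h2⟩
      subst h1
      simp [pvB_commonPrefix, ih ys h2]


theorem pv_fm_none : ∀ (a b : List Char), pvA_firstMismatch a b = none → a <+: b ∨ b <+: a := by
  intro a
  induction a with
  | nil => intro b _; left; exact List.nil_prefix
  | cons x xs ih =>
    intro b hb
    cases b with
    | nil => right; exact List.nil_prefix
    | cons y ys =>
      by_cases h : x = y
      · subst h
        simp [pvA_firstMismatch] at hb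
        rcases ih ys hb with h1 | h1
        · left; exact List.cons_prefix_cons.mpr ⟨rfl, h1⟩
        · right; exact List.cons_prefix_cons.mpr ⟨rfl, h1⟩
      · simp [pvA_firstMismatch, h] at hb


theorem pv_stepA_eq : ∀ (m w : List Char), pvA_marginStep (some m) w = some (pvB_commonPrefix m w) := by
  intro m
  induction m with
  | nil =>
    intro w
    simp [pvA_marginStep, List.isPrefixOf_iff_prefix, List.nil_prefix]
    cases w <;> simp [pvB_commonPrefix]
  | cons x xs ih =>
    intro w
    cases w with
    | nil =>
      simp [pvA_marginStep, List.isPrefixOf_iff_prefix, List.nil_prefix]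
      simp [pvB_commonPrefix]
    | cons y ys =>
      by_cases h : x = y
      · subst h
        by_cases h1 : (x :: xs) <+: (x :: ys)
        · rw [pvA_marginStep]
          rw [if_pos (List.isPrefixOf_iff_prefix.mpr h1)]
          rw [pv_cp_of_prefix_left _ _ h1]
        · by_cases h2 : (x :: ys) <+: (x :: xs)
          · rw [pvA_marginStep]
            rw [if_neg (by simpa [List.isPrefixOf_iff_prefix] using h1)]
            rw [if_pos (List.isPrefixOf_iff_prefix.mpr h2)]
            rw [pv_cp_of_prefix_right _ _ h2]
          · rw [pvA_marginStep]
            rw [if_neg (by simpa [List.isPrefixOf_iff_prefix] using h1)]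
            rw [if_neg (by simpa [List.isPrefixOf_iff_prefix] using h2)]
            have hxs : ¬ xs <+: ys := fun hc => h1 (List.cons_prefix_cons.mpr ⟨rfl, hc⟩)
            have hys : ¬ ys <+: xs := fun hc => h2 (List.cons_prefix_cons.mpr ⟨rfl, hc⟩)
            rcases hm : pvA_firstMismatch xs ys with _ | i
            · rcases pv_fm_none xs ys hm with hc | hc
              · exact absurd hc hxs
              · exact absurd hc hys
            · have ihx := ih ys
              rw [pvA_marginStep] at ihx
              rw [if_neg (by simpa [List.isPrefixOf_iff_prefix] using hxs)] at ihx
              rw [if_neg (by simpa [List.isPrefixOf_iff_prefix] using hys)] at ihx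
              rw [hm] at ihx
              simp only [Option.some.injEq] at ihx
              simp [pvA_firstMismatch, pvB_commonPrefix, hm, ← ihx, List.take_succ_cons]
      · have h' : ¬ y = x := fun hc => h hc.symm
        simp [pvA_marginStep, List.isPrefixOf_iff_prefix, List.cons_prefix_cons, h, h',
              pvA_firstMismatch, pvB_commonPrefix]

-- proof-side abbreviations for the shared margin computation
def pvHasC (l : List Char) : Bool := !(l.dropWhile pvA_isWsChar).isEmpty
def pvWsOf (l : List Char) : List Char := l.takeWhile pvA_isWsChar
def pvStepB (acc : Option (List Char)) (w : List Char) : Option (List Char) :=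
  match acc with
  | none => some w
  | some m => some (pvB_commonPrefix m w)
def pvBlank (l : List Char) : List Char := if pvA_wsOnly l then [] else l

theorem pv_take_takeWhile (l : List Char) :
    l.take (l.takeWhile pvA_isWsChar).length = l.takeWhile pvA_isWsChar :=
  (List.prefix_iff_eq_take.mp (List.takeWhile_prefix _)).symm

theorem pv_takeWhile_lt_iff (l : List Char) :
    ((l.takeWhile pvA_isWsChar).length < l.length) ↔ pvHasC l = true := by
  have h := congrArg List.length (List.takeWhile_append_dropWhile (p := pvA_isWsChar) (l := l))
  rw [List.length_append] at h
  unfold pvHasC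
  rcases hd : l.dropWhile pvA_isWsChar with _ | ⟨a, t⟩ <;> rw [hd] at h <;> simp at h ⊢ <;> omega

theorem pv_margin_eq (L : List (List Char)) :
    pvB_margin L = ((L.filter pvHasC).map pvWsOf).foldl pvStepB none := by
  unfold pvB_margin
  have hbody : (fun (margin : Option (List Char)) (l : List Char) =>
      let k := (l.takeWhile pvB_isWsChar).length
      if k < l.length then
        match margin with
        | none => some (l.take k)
        | some m => some (pvB_commonPrefix m (l.take k))
      else margin)
      = fun margin l => if pvHasC l = true then pvStepB margin (pvWsOf l) else margin := by
    funext margin l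
    show (if (l.takeWhile pvB_isWsChar).length < l.length then _ else _) = _
    rw [show pvB_isWsChar = pvA_isWsChar from rfl]
    by_cases h : pvHasC l = true
    · rw [if_pos ((pv_takeWhile_lt_iff l).mpr h), if_pos h]
      rw [pv_take_takeWhile]
      cases margin <;> rfl
    · rw [if_neg (fun hc => h ((pv_takeWhile_lt_iff l).mp hc)), if_neg h]
  rw [hbody, PySem.List.foldl_if_eq_foldl_filter pvHasC (fun acc l => pvStepB acc (pvWsOf l)) L none]
  rw [List.foldl_map]

theorem pv_wsOnly_hasC_false {l : List Char} (h : pvA_wsOnly l = true) : pvHasC l = false := by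
  simp [pvA_wsOnly] at h
  unfold pvHasC
  rw [List.dropWhile_eq_nil_iff.mpr (fun x hx => h.2 x hx)]
  rfl

theorem pv_filter_blank (L : List (List Char)) :
    (L.map pvBlank).filter pvHasC = L.filter pvHasC := by
  induction L with
  | nil => rfl
  | cons l t ih =>
    by_cases h : pvA_wsOnly l = true
    · have h1 : pvBlank l = [] := if_pos h
      have h2 : pvHasC l = false := pv_wsOnly_hasC_false h
      simp [h1, h2, List.filter_cons, ih]
      rfl
    · have h1 : pvBlank l = l := if_neg (by simp [h])
      simp only [List.map_cons, List.filter_cons, h1, ih]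

theorem pv_marginStep_eq_stepB : pvA_marginStep = pvStepB := by
  funext acc w
  cases acc with
  | none => rfl
  | some m => exact pv_stepA_eq m w

theorem pv_fold_none : ∀ (ws : List (List Char)) (acc : Option (List Char)),
    ws.foldl pvStepB acc = none → acc = none ∧ ws = [] := by
  intro ws
  induction ws with
  | nil => intro acc h; exact ⟨h, rfl⟩
  | cons w t ih =>
    intro acc h
    have := (ih (pvStepB acc w) h).1
    cases acc <;> simp [pvStepB] at this

theorem pv_minv : ∀ (ws : List (List Char)) (acc : Option (List Char)) (m : List Char),
    ws.foldl pvStepB acc = some m →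
    (∀ w ∈ ws, m <+: w) ∧ (∀ a, acc = some a → m <+: a) := by
  intro ws
  induction ws with
  | nil =>
    intro acc m h
    refine ⟨by simp, fun a ha => ?_⟩
    rw [ha] at h
    cases h
    exact List.prefix_refl _
  | cons w t ih =>
    intro acc m h
    rcases ih (pvStepB acc w) m h with ⟨h1, h2⟩
    have hw : m <+: w := by
      cases acc with
      | none => simpa using h2 w rfl
      | some a => exact (h2 (pvB_commonPrefix a w) rfl).trans (pv_cp_prefix_right a w)
    refine ⟨fun w' hw' => ?_, fun a ha => ?_⟩
    · rcases List.mem_cons.mp hw' with rfl | hm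
      · exact hw
      · exact h1 w' hm
    · subst ha
      exact (h2 (pvB_commonPrefix a w) rfl).trans (pv_cp_prefix_left a w)

theorem pv_prefix_all {p : Char → Bool} {a b : List Char} (h : a <+: b)
    (hb : b.all p = true) : a.all p = true := by
  rw [List.all_eq_true] at *
  exact fun x hx => hb x (h.subset hx)

theorem pv_mall : ∀ (ws : List (List Char)) (acc : Option (List Char)) (m : List Char),
    (∀ w ∈ ws, w.all pvA_isWsChar = true) →
    (∀ a, acc = some a → a.all pvA_isWsChar = true) →
    ws.foldl pvStepB acc = some m → m.all pvA_isWsChar = true := by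
  intro ws
  induction ws with
  | nil =>
    intro acc m _ hacc h
    exact hacc m h
  | cons w t ih =>
    intro acc m hws hacc h
    refine ih (pvStepB acc w) m (fun w' hw' => hws w' (List.mem_cons_of_mem _ hw')) ?_ h
    intro a ha
    cases acc with
    | none =>
      cases ha
      exact hws w (List.mem_cons_self)
    | some a0 =>
      cases ha
      exact pv_prefix_all (pv_cp_prefix_right a0 w) (hws w (List.mem_cons_self))

theorem pv_hasC_false_strip {l : List Char} (h : pvHasC l = false) : PySem.Chars.strip l = [] := by
  unfold pvHasC at h
  rw [Bool.not_eq_false', List.isEmpty_iff] at h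
  refine (pv_strip_eq_nil_iff l).mpr (fun x hx => ?_)
  exact pv_ws_isspace (List.dropWhile_eq_nil_iff.mp h x hx)

theorem pv_strip_ne_hasC {l : List Char} (h : PySem.Chars.strip l ≠ []) : pvHasC l = true := by
  rcases hc : pvHasC l with _ | _
  · exact absurd (pv_hasC_false_strip hc) h
  · rfl

theorem pv_wsOnly_strip {l : List Char} (h : pvA_wsOnly l = true) : PySem.Chars.strip l = [] :=
  pv_hasC_false_strip (pv_wsOnly_hasC_false h)

theorem pv_strip_subset {l' l : List Char} (h : ∀ x ∈ l', x ∈ l)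
    (hl : PySem.Chars.strip l = []) : PySem.Chars.strip l' = [] :=
  (pv_strip_eq_nil_iff l').mpr (fun x hx => (pv_strip_eq_nil_iff l).mp hl x (h x hx))

theorem pv_blank_of_strip {l : List Char} (h : PySem.Chars.strip l = []) :
    PySem.Chars.strip (pvBlank l) = [] := by
  unfold pvBlank
  split
  · rfl
  · exact h

theorem pv_roundtrip (ls : List (List Char)) (h1 : ls ≠ []) (h2 : ∀ l ∈ ls, '\n' ∉ l) :
    PySem.Chars.splitOn (PySem.Chars.join ['\n'] ls) ['\n'] = ls := by
  rw [show PySem.Chars.join ['\n'] ls = ['\n'].intercalate ls from rfl]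
  rw [pv_splitOn_single]
  exact List.splitOn_intercalate ls '\n' h2 h1

theorem pv_L_ne (s : List Char) : PySem.Chars.splitOn s ['\n'] ≠ [] := by
  rw [pv_splitOn_single]
  exact List.splitOnP_ne_nil _ _

theorem pv_L_nomem (s : List Char) : ∀ l ∈ PySem.Chars.splitOn s ['\n'], '\n' ∉ l := by
  rw [pv_splitOn_single]
  exact pv_not_mem_splitOnP '\n' s

theorem pv_ff : ∀ (ls : List (List Char)) (i : Int) (k : Nat) (hk : k < ls.length),
    (i + k) < pvA_findFirst ls i → PySem.Chars.strip ls[k] = [] := by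
  intro ls
  induction ls with
  | nil => intro i k hk; simp at hk
  | cons l rest ih =>
    intro i k hk h
    by_cases hc : PySem.Chars.strip l = []
    · cases k with
      | zero => simpa using hc
      | succ k' =>
        have h' : (i + 1) + (k' : Int) < pvA_findFirst rest (i + 1) := by
          rw [pvA_findFirst, if_neg (by simp [hc])] at h
          push_cast at h ⊢
          omega
        simpa using ih (i + 1) k' (by simpa using hk) h'
    · exfalso
      rw [pvA_findFirst, if_pos (by simp [List.isEmpty_iff, hc])] at h
      omega

theorem pv_fl (lines : List (List Char)) : ∀ (idxs : List Int), idxs.Pairwise (· > ·) →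
    ∀ j ∈ idxs, pvA_findLast lines idxs < j →
    PySem.Chars.strip (PySem.List.pyGetD lines j []) = [] := by
  intro idxs
  induction idxs with
  | nil => simp
  | cons i rest ih =>
    intro hp j hj hlt
    rcases List.pairwise_cons.mp hp with ⟨hall, hp'⟩
    by_cases hc : PySem.Chars.strip (PySem.List.pyGetD lines i []) = []
    · rw [pvA_findLast, if_neg (by simp [hc])] at hlt
      rcases List.mem_cons.mp hj with rfl | hm
      · exact hc
      · exact ih hp' j hm hlt
    · rw [pvA_findLast, if_pos (by simp [List.isEmpty_iff, hc])] at hlt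
      rcases List.mem_cons.mp hj with rfl | hm
      · omega
      · exact absurd hlt (not_lt.mpr (le_of_lt (hall j hm)))

theorem pv_pyRange_down (n : Nat) :
    PySem.List.pyRange ((n : Int) - 1) (-1) (-1)
      = (List.range n).map (fun (k : Nat) => (n : Int) - 1 - k) := by
  by_cases hn : 0 < n
  · unfold PySem.List.pyRange
    rw [if_neg (by norm_num)]
    rw [if_neg (by norm_num), if_pos (by omega)]
    show List.map (fun (k : Nat) => (n : Int) - 1 + -1 * (k : Int))
        (List.range (((n : Int) - 1 - -1 + - -1 - 1) / - -1).toNat) = _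
    rw [show (((n : Int) - 1 - -1 + - -1 - 1) / - -1).toNat = n from by norm_num]
    exact List.map_congr_left (fun k hk => by push_cast; ring)
  · have hn0 : n = 0 := by omega
    subst hn0
    rfl

theorem pv_enum_map {α β : Type} (body : Int × α → β) (body' : α → β) :
    ∀ (ls : List α) (s : Int),
      (∀ (k : Nat) (hk : k < ls.length), body (s + (k : Int), ls[k]) = body' ls[k]) →
      (PySem.List.enumerate ls s).map body = ls.map body' := by
  intro ls
  induction ls with
  | nil => intro s _; rfl
  | cons x t ih =>
    intro s h
    have h0 := h 0 (by simp)
    rw [show s + ((0 : Nat) : Int) = s from by push_cast; ring] at h0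
    show body (s, x) :: (PySem.List.enumerate t (s + 1)).map body = body' x :: t.map body'
    simp only [List.getElem_cons_zero] at h0
    rw [h0]
    congr 1
    refine ih (s + 1) (fun k hk => ?_)
    have hx := h (k + 1) (by simpa using Nat.succ_lt_succ hk)
    rw [show s + ((k + 1 : Nat) : Int) = (s + 1) + (k : Int) from by push_cast; ring] at hx
    simpa using hx

theorem pv_body_eq (ls : List (List Char)) (pad : List Char) (k : Nat) (hk : k < ls.length) :
    (if ((0 : Int) + (k : Int)) < pvA_findFirst ls 0
        ∨ ((0 : Int) + (k : Int)) > pvA_findLast ls (PySem.List.pyRange ((ls.length : Int) - 1) (-1) (-1))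
     then ([] : List Char)
     else if !(PySem.Chars.strip ls[k]).isEmpty then pad ++ ls[k] else [])
    = (if !(PySem.Chars.strip ls[k]).isEmpty then pad ++ ls[k] else []) := by
  by_cases h1 : ((0 : Int) + (k : Int)) < pvA_findFirst ls 0
  · have hs : PySem.Chars.strip ls[k] = [] := pv_ff ls 0 k hk h1
    rw [if_pos (Or.inl h1), hs]
    rfl
  · by_cases h2 : ((0 : Int) + (k : Int)) > pvA_findLast ls (PySem.List.pyRange ((ls.length : Int) - 1) (-1) (-1))
    · have hmem : (k : Int) ∈ PySem.List.pyRange ((ls.length : Int) - 1) (-1) (-1) := by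
        rw [pv_pyRange_down ls.length]
        refine List.mem_map.mpr ⟨ls.length - 1 - k, List.mem_range.mpr (by omega), by omega⟩
      have hpw : (PySem.List.pyRange ((ls.length : Int) - 1) (-1) (-1)).Pairwise (· > ·) := by
        rw [pv_pyRange_down ls.length]
        exact List.Pairwise.map _ (fun a b hab => by omega) List.pairwise_lt_range
      have hlt : pvA_findLast ls (PySem.List.pyRange ((ls.length : Int) - 1) (-1) (-1)) < (k : Int) := by
        omega
      have hs0 := pv_fl ls _ hpw (k : Int) hmem hlt
      rw [PySem.List.pyGetD_of_nonneg ls [] (by omega)] at hs0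
      rw [Int.toNat_natCast, List.getD_eq_getElem ls [] hk] at hs0
      rw [if_pos (Or.inr h2), hs0]
      rfl
    · rw [if_neg (by intro h; rcases h with h | h <;> omega)]

theorem pv_line_none {l : List Char} (pad : List Char) (hC : pvHasC l = false) :
    (if !(PySem.Chars.strip (pvBlank l)).isEmpty then pad ++ pvBlank l else [])
    = (if !(PySem.Chars.strip l).isEmpty then pad ++ l.drop (([] : List Char).length) else []) := by
  have hs := pv_hasC_false_strip hC
  rw [pv_blank_of_strip hs, hs]
  rfl

theorem pv_line_empty_margin (l : List Char) (pad : List Char) :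
    (if !(PySem.Chars.strip (pvBlank l)).isEmpty then pad ++ pvBlank l else [])
    = (if !(PySem.Chars.strip l).isEmpty then pad ++ l.drop (([] : List Char).length) else []) := by
  by_cases hs : PySem.Chars.strip l = []
  · rw [pv_blank_of_strip hs, hs]
    rfl
  · have hw : pvA_wsOnly l = false := by
      rcases h : pvA_wsOnly l
      · rfl
      · exact absurd (pv_wsOnly_strip h) hs
    have hbl : pvBlank l = l := by simp [pvBlank, hw]
    rw [hbl, List.length_nil, List.drop_zero]

theorem pv_line_margin {L : List (List Char)} {m : List Char} (pad : List Char)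
    (hM : pvB_margin L = some m) (hm0 : m ≠ []) {l : List Char} (hl : l ∈ L) :
    (if !(PySem.Chars.strip (if m.isPrefixOf (pvBlank l) then (pvBlank l).drop m.length else pvBlank l)).isEmpty
     then pad ++ (if m.isPrefixOf (pvBlank l) then (pvBlank l).drop m.length else pvBlank l) else [])
    = (if !(PySem.Chars.strip l).isEmpty then pad ++ l.drop m.length else []) := by
  have hfold : ((L.filter pvHasC).map pvWsOf).foldl pvStepB none = some m := by
    rw [← pv_margin_eq]
    exact hM
  by_cases hs : PySem.Chars.strip l = []
  · have hsub : ∀ x ∈ (if m.isPrefixOf (pvBlank l) then (pvBlank l).drop m.length else pvBlank l), x ∈ l := by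
      intro x hx
      have hbm : ∀ y ∈ pvBlank l, y ∈ l := by
        intro y hy
        unfold pvBlank at hy
        split at hy
        · simp at hy
        · exact hy
      split at hx
      · exact hbm x (List.mem_of_mem_drop hx)
      · exact hbm x hx
    rw [pv_strip_subset hsub hs, hs]
    rfl
  · have hC := pv_strip_ne_hasC hs
    have hw : pvA_wsOnly l = false := by
      rcases h : pvA_wsOnly l
      · rfl
      · exact absurd (pv_wsOnly_strip h) hs
    have hbl : pvBlank l = l := by simp [pvBlank, hw]
    have hpre : m <+: l :=
      (((pv_minv _ _ _ hfold).1 (pvWsOf l)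
          (List.mem_map_of_mem (List.mem_filter.mpr ⟨hl, hC⟩)))).trans (List.takeWhile_prefix _)
    have hall : m.all pvA_isWsChar = true := by
      refine pv_mall _ none m (fun w hw' => ?_) (by simp) hfold
      rcases List.mem_map.mp hw' with ⟨l', _, rfl⟩
      exact List.all_takeWhile
    rw [hbl, if_pos (List.isPrefixOf_iff_prefix.mpr hpre)]
    obtain ⟨t, ht⟩ := hpre
    have hdrop : l.drop m.length = t := by
      rw [← ht]
      exact List.drop_left
    have hst : PySem.Chars.strip t ≠ [] := by
      intro hc
      apply hs
      refine (pv_strip_eq_nil_iff l).mpr (fun x hx => ?_)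
      rw [← ht] at hx
      rcases List.mem_append.mp hx with h1 | h1
      · exact pv_ws_isspace (List.all_eq_true.mp hall x h1)
      · exact (pv_strip_eq_nil_iff t).mp hc x h1
    rw [hdrop]
    rw [if_pos (by simp [List.isEmpty_iff, hst]), if_pos (by simp [List.isEmpty_iff, hs])]

theorem pv_blank_subset (l : List Char) : ∀ x ∈ pvBlank l, x ∈ l := by
  intro x hx
  unfold pvBlank at hx
  split at hx
  · simp at hx
  · exact hx

theorem pv_dl_subset (m l : List Char) :
    ∀ x ∈ (if m.isPrefixOf (pvBlank l) = true then (pvBlank l).drop m.length else pvBlank l), x ∈ l := by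
  intro x hx
  split at hx
  · exact pv_blank_subset l x (List.mem_of_mem_drop hx)
  · exact pv_blank_subset l x hx

theorem format_string_content_total (content : String) (indent_level : Int) :
    format_string_content content indent_level = format_string_content_alt content indent_level := by
  simp only [format_string_content, format_string_content_alt, pvA_dedent]
  set L := PySem.Chars.splitOn content.toList ['\n'] with hLdef
  have hNE : L ≠ [] := by rw [hLdef]; exact pv_L_ne content.toList
  have hNL : ∀ l ∈ L, '\n' ∉ l := by rw [hLdef]; exact pv_L_nomem content.toList
  simp only [show (fun l => if pvA_wsOnly l = true then ([] : List Char) else l) = pvBlank from rfl,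
      show (fun (l : List Char) => !(List.dropWhile pvA_isWsChar l).isEmpty) = pvHasC from rfl,
      show (fun (l : List Char) => List.takeWhile pvA_isWsChar l) = pvWsOf from rfl,
      pv_marginStep_eq_stepB, pv_filter_blank, ← pv_margin_eq]
  split
  case _ m heq =>
    by_cases hm0 : m = []
    · subst hm0
      simp only [if_neg (show ¬ ((!List.isEmpty ([] : List Char)) = true) from by decide)]
      have hrt := pv_roundtrip (List.map pvBlank (PySem.Chars.splitOn content.toList ['\n']))
          (by simpa [List.map_eq_nil_iff] using hNE)
          (by intro l hl
              rcases List.mem_map.mp hl with ⟨l0, hl0, rfl⟩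
              intro hmem
              exact hNL l0 hl0 (pv_blank_subset l0 '\n' hmem))
      rw [hrt, PySem.List.foldl_append_singleton_eq_map, List.nil_append]
      refine congrArg String.ofList (congrArg (PySem.Chars.join ['\n']) ?_)
      rw [pv_enum_map _ (fun l => if (!(PySem.Chars.strip l).isEmpty) = true
            then PySem.List.pyRepeat [' '] indent_level ++ l else []) _ 0
            (fun k hk => pv_body_eq _ _ k hk), List.map_map]
      refine List.map_congr_left (fun l hl => ?_)
      simpa [Function.comp] using pv_line_empty_margin l (PySem.List.pyRepeat [' '] indent_level)
    · simp only [if_pos (show (!m.isEmpty) = true from by simp [List.isEmpty_iff, hm0]), List.map_map]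
      have hrt := pv_roundtrip (List.map ((fun l => if m.isPrefixOf l = true then List.drop m.length l else l) ∘ pvBlank)
            (PySem.Chars.splitOn content.toList ['\n']))
          (by simpa [List.map_eq_nil_iff] using hNE)
          (by intro l hl
              rcases List.mem_map.mp hl with ⟨l0, hl0, rfl⟩
              intro hmem
              exact hNL l0 hl0 (pv_dl_subset m l0 '\n' (by simpa [Function.comp] using hmem)))
      rw [hrt, PySem.List.foldl_append_singleton_eq_map, List.nil_append]
      refine congrArg String.ofList (congrArg (PySem.Chars.join ['\n']) ?_)
      rw [pv_enum_map _ (fun l => if (!(PySem.Chars.strip l).isEmpty) = true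
            then PySem.List.pyRepeat [' '] indent_level ++ l else []) _ 0
            (fun k hk => pv_body_eq _ _ k hk), List.map_map]
      refine List.map_congr_left (fun l hl => ?_)
      simpa [Function.comp] using
        pv_line_margin (PySem.List.pyRepeat [' '] indent_level) heq hm0 hl
  case _ heq =>
    rw [pv_margin_eq] at heq
    have hallC : ∀ l ∈ (PySem.Chars.splitOn content.toList ['\n']), pvHasC l = false := by
      intro l hl
      have h0 := (pv_fold_none _ none heq).2
      rw [List.map_eq_nil_iff, List.filter_eq_nil_iff] at h0
      exact Bool.not_eq_true _ ▸ (by simpa using h0 l hl)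
    have hrt := pv_roundtrip (List.map pvBlank (PySem.Chars.splitOn content.toList ['\n']))
        (by simpa [List.map_eq_nil_iff] using hNE)
        (by intro l hl
            rcases List.mem_map.mp hl with ⟨l0, hl0, rfl⟩
            intro hmem
            exact hNL l0 hl0 (pv_blank_subset l0 '\n' hmem))
    rw [hrt, PySem.List.foldl_append_singleton_eq_map, List.nil_append]
    refine congrArg String.ofList (congrArg (PySem.Chars.join ['\n']) ?_)
    rw [pv_enum_map _ (fun l => if (!(PySem.Chars.strip l).isEmpty) = true
          then PySem.List.pyRepeat [' '] indent_level ++ l else []) _ 0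
          (fun k hk => pv_body_eq _ _ k hk), List.map_map]
    refine List.map_congr_left (fun l hl => ?_)
    simpa [Function.comp] using pv_line_none (PySem.List.pyRepeat [' '] indent_level) (hallC l hl)

-- ===== VERDICT (by name: the statement is the Claim_ definition above) =====
theorem format_string_content_spec : Claim_equal_format_string_content := by
  intro content indent_level _
  exact format_string_content_total content indent_level
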